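-- pv_equiv track=rewrite | github.com/LupaDevStudio/Geozzle | tools/linconym.py | count_different_letters
-- ===== SOURCE A (Python) =====
-- def count_different_letters(word1: str, word2: str):
--     """
--     Count the number of different letters between two words.
--
--     Parameters
--     ----------
--     word1 : str
--         First word.
--     word2 : str
--         Second word.
--
--     Returns
--     -------
--     int
--         Number of different letters.
--     """
--
--     # Initialise the number of different letters
--     nb_different_letters = 0
--     used_letters = [False] * len(word2)
--
--     # Iterate over the letters of the first word
--     for letter in word1:
--         valid_letter_bool = False
--         for i, check_letter in enumerate(word2):
--             if check_letter == letter and used_letters[i] is False: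
--                 used_letters[i] = True
--                 valid_letter_bool = True
--                 break
--         if valid_letter_bool is False:
--             nb_different_letters += 1
--
--     return nb_different_letters
-- ===== SOURCE B (Python) =====
-- def count_different_letters(word1: str, word2: str):
--     s1 = sorted(word1)
--     s2 = sorted(word2)
--     i = j = matched = 0
--     while i < len(s1) and j < len(s2):
--         if s1[i] == s2[j]:
--             matched += 1
--             i += 1
--             j += 1
--         elif s1[i] < s2[j]:
--             i += 1
--         else:
--             j += 1
--     return len(word1) - matched
-- ===== Notes on version B (the rewrite author's own statement) =====
-- stated objective: faster
-- what changed: Replaces the nested scan over word2 with a used-flags array by sorting both words and counting matches in a single two-pointer merge pass, subtracting the matched count from len(word1).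
import Mathlib
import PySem

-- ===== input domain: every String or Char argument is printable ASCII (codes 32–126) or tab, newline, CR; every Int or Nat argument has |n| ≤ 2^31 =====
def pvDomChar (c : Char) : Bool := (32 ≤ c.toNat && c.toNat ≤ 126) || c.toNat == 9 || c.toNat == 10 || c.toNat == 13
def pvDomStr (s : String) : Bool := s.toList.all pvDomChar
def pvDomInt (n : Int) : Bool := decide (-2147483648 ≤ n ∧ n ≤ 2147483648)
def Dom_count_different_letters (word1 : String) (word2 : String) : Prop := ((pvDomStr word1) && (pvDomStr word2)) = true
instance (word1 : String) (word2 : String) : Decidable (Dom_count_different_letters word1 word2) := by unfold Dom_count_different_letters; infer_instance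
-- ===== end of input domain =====

-- B sorts both words and counts matched letters in one two-pointer merge pass
-- instead of A's nested scan with a used-flags array (objective: faster).

-- ===== PORT A =====
-- inner loop of A: walk word2 (each char paired with its used-flag); on the first
-- unused equal char, mark it used and stop (some updated state); none = not found
def pvInnerA (letter : Char) : List (Char × Bool) → Option (List (Char × Bool))
  | [] => none
  | (c, u) :: rest =>
    if c = letter ∧ u = false then some ((c, true) :: rest)
    else (pvInnerA letter rest).map (fun r => (c, u) :: r)

-- outer loop of A over the letters of word1, state = flagged word2 + counter
def pvOuterA : List Char → List (Char × Bool) → Int → Int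
  | [], _, nb => nb
  | l :: rest, st, nb =>
    match pvInnerA l st with
    | some st' => pvOuterA rest st' nb
    | none => pvOuterA rest st (nb + 1)

def count_different_letters (word1 : String) (word2 : String) : Int :=
  pvOuterA word1.toList (word2.toList.map (fun c => (c, false))) 0

-- ===== PORT B =====
-- two-pointer merge of the while-loop in Source B, as recursion on the two sorted lists
def pvMergeCount : List Char → List Char → Nat
  | a :: s, b :: t =>
    if a = b then pvMergeCount s t + 1
    else if a < b then pvMergeCount s (b :: t)
    else pvMergeCount (a :: s) t
  | _, _ => 0
  termination_by s t => s.length + t.length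

def count_different_letters_alt (word1 : String) (word2 : String) : Int :=
  PySem.Str.len word1 -
    (pvMergeCount (PySem.List.sorted word1.toList (fun c => c) false)
                  (PySem.List.sorted word2.toList (fun c => c) false) : Int)

-- ===== PRECONDITION & SPEC =====
def Spec_count_different_letters (word1 : String) (word2 : String) (out : Int) : Prop := out = count_different_letters_alt word1 word2
instance (word1 : String) (word2 : String) (out : Int) : Decidable (Spec_count_different_letters word1 word2 out) := by unfold Spec_count_different_letters; infer_instance

-- ===== CLAIM (what is proved, stated in full; the proofs are below) =====
def Claim_equal_count_different_letters : Prop := ∀ (word1 : String) (word2 : String), Dom_count_different_letters word1 word2 → Spec_count_different_letters word1 word2 (count_different_letters word1 word2)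

-- ===== LEMMAS AND PROOFS =====

-- the multiset of still-unused letters in A's state
def pvAvail (st : List (Char × Bool)) : Multiset Char :=
  ((st.filter (fun p => !p.2)).map Prod.fst : List Char)

-- reference greedy count: letters of l not matchable against multiset m
def pvUnmatched : List Char → Multiset Char → Nat
  | [], _ => 0
  | a :: l, m => if a ∈ m then pvUnmatched l (m.erase a) else pvUnmatched l m + 1

theorem pvAvail_cons_true (c : Char) (st : List (Char × Bool)) :
    pvAvail ((c, true) :: st) = pvAvail st := by
  simp [pvAvail]

theorem pvAvail_cons_false (c : Char) (st : List (Char × Bool)) :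
    pvAvail ((c, false) :: st) = c ::ₘ pvAvail st := by
  simp [pvAvail]

theorem pvInnerA_none {a : Char} {st : List (Char × Bool)} :
    pvInnerA a st = none ↔ a ∉ pvAvail st := by
  induction st with
  | nil => simp [pvInnerA, pvAvail]
  | cons p rest ih =>
    obtain ⟨c, u⟩ := p
    by_cases h : c = a ∧ u = false
    · obtain ⟨rfl, rfl⟩ := h
      simp [pvInnerA, pvAvail_cons_false]
    · cases u with
      | true => simpa [pvInnerA, h, pvAvail_cons_true, Option.map_eq_none_iff] using ih
      | false =>
        have hc : c ≠ a := by simpa using h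
        simp [pvInnerA, pvAvail_cons_false, Option.map_eq_none_iff, ih, hc, Ne.symm hc]

theorem pvInnerA_some {a : Char} {st st' : List (Char × Bool)} :
    pvInnerA a st = some st' → pvAvail st' = (pvAvail st).erase a := by
  induction st generalizing st' with
  | nil => simp [pvInnerA]
  | cons p rest ih =>
    obtain ⟨c, u⟩ := p
    by_cases h : c = a ∧ u = false
    · obtain ⟨rfl, rfl⟩ := h
      intro hs
      simp only [pvInnerA, and_self, if_pos, Option.some.injEq] at hs
      subst hs
      simp [pvAvail_cons_true, pvAvail_cons_false]
    · intro hs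
      simp only [pvInnerA, if_neg h, Option.map_eq_some_iff] at hs
      obtain ⟨r, hr, rfl⟩ := hs
      cases u with
      | true => simp [pvAvail_cons_true, ih hr]
      | false =>
        have hc : c ≠ a := by simpa using h
        rw [pvAvail_cons_false, pvAvail_cons_false, ih hr,
          Multiset.erase_cons_tail _ hc]

theorem pvOuterA_eq (l : List Char) (st : List (Char × Bool)) (nb : Int) :
    pvOuterA l st nb = nb + pvUnmatched l (pvAvail st) := by
  induction l generalizing st nb with
  | nil => simp [pvOuterA, pvUnmatched]
  | cons a l ih =>
    rcases hs : pvInnerA a st with _ | st'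
    · have hna : a ∉ pvAvail st := pvInnerA_none.1 hs
      simp only [pvOuterA, hs, ih, pvUnmatched, if_neg hna]
      push_cast
      ring
    · have hmem : a ∈ pvAvail st := by
        by_contra hna
        rw [← pvInnerA_none] at hna
        simp [hna] at hs
      simp [pvOuterA, hs, ih, pvUnmatched, if_pos hmem, pvInnerA_some hs]

theorem pvUnmatched_card (l : List Char) (m : Multiset Char) :
    pvUnmatched l m + Multiset.card ((l : Multiset Char) ∩ m) = l.length := by
  induction l generalizing m with
  | nil => simp [pvUnmatched]
  | cons a l ih =>
    by_cases h : a ∈ m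
    · rw [pvUnmatched, if_pos h, ← Multiset.cons_coe, Multiset.cons_inter_of_pos _ h]
      have := ih (m.erase a)
      simp only [Multiset.card_cons, List.length_cons]
      omega
    · rw [pvUnmatched, if_neg h, ← Multiset.cons_coe, Multiset.cons_inter_of_neg _ h]
      have := ih m
      simp only [List.length_cons]
      omega

theorem pvMergeCount_eq (s t : List Char) :
    s.Pairwise (· ≤ ·) → t.Pairwise (· ≤ ·) →
    (pvMergeCount s t : Nat) = Multiset.card ((s : Multiset Char) ∩ (t : Multiset Char)) := by
  induction s, t using pvMergeCount.induct with
  | case1 s b t ih =>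
    intro hs ht
    rw [pvMergeCount]
    rw [← Multiset.cons_coe, ← Multiset.cons_coe,
      Multiset.cons_inter_of_pos _ (by simp), Multiset.erase_cons_head]
    simp [ih (List.Pairwise.of_cons hs) (List.Pairwise.of_cons ht)]
  | case2 a s b t hab hlt ih =>
    intro hs ht
    have hna : a ∉ (b :: t) := by
      intro hmem
      rcases List.mem_cons.1 hmem with rfl | hmem
      · exact hab rfl
      · exact absurd (List.rel_of_pairwise_cons ht hmem) (not_le.2 hlt)
    rw [pvMergeCount]
    simp only [if_neg hab, if_pos hlt]
    rw [← Multiset.cons_coe, Multiset.cons_inter_of_neg _ (by exact_mod_cast hna)]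
    exact ih (List.Pairwise.of_cons hs) ht
  | case3 a s b t hab hlt ih =>
    intro hs ht
    have hnb : b ∉ (a :: s) := by
      intro hmem
      rcases List.mem_cons.1 hmem with rfl | hmem
      · exact hab rfl
      · have hle := List.rel_of_pairwise_cons hs hmem
        have hba : b < a := lt_of_le_of_ne (not_lt.1 hlt) (fun e => hab e.symm)
        exact absurd hle (not_le.2 hba)
    rw [pvMergeCount]
    simp only [if_neg hab, if_neg hlt]
    rw [Multiset.inter_comm, ← Multiset.cons_coe,
      Multiset.cons_inter_of_neg _ (by exact_mod_cast hnb), Multiset.inter_comm]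
    exact ih hs (List.Pairwise.of_cons ht)
  | case4 s t h =>
    intro _ _
    rcases s with _ | ⟨a, s⟩
    · simp [pvMergeCount]
    · rcases t with _ | ⟨b, t⟩
      · simp [pvMergeCount]
      · exact absurd (h a s b t rfl rfl) (fun e => e)

theorem pvAvail_init (w : List Char) :
    pvAvail (w.map (fun c => (c, false))) = (w : Multiset Char) := by
  induction w with
  | nil => rfl
  | cons c w ih => simp [pvAvail_cons_false, ih]

-- ===== VERDICT (by name: the statement is the Claim_ definition above) =====
theorem count_different_letters_spec : Claim_equal_count_different_letters := by
  intro word1 word2 _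
  show _ = _
  unfold count_different_letters count_different_letters_alt
  rw [pvOuterA_eq, pvAvail_init]
  have hperm1 : (PySem.List.sorted word1.toList (fun c => c) false).Perm word1.toList :=
    PySem.List.sorted_perm _ _ _
  have hperm2 : (PySem.List.sorted word2.toList (fun c => c) false).Perm word2.toList :=
    PySem.List.sorted_perm _ _ _
  rw [pvMergeCount_eq _ _
      (by simpa using PySem.List.sorted_pairwise word1.toList (fun c => c))
      (by simpa using PySem.List.sorted_pairwise word2.toList (fun c => c))]
  rw [Multiset.coe_eq_coe.2 hperm1, Multiset.coe_eq_coe.2 hperm2]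
  have hcard := pvUnmatched_card word1.toList (word2.toList : Multiset Char)
  have hlen : PySem.Str.len word1 = (word1.toList.length : Int) := by
    simp [PySem.Str.len]
  omega
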